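-- pv_equiv track=rewrite | github.com/luthfianto/identity-card-aws-old | ocrs/textract.py | textract_lines_to_rekognition
-- ===== SOURCE A (Python) =====
-- from typing import List
--
-- def ismixed(s):
--     return any(c.islower() for c in s) and any(c.isupper() for c in s)
--
-- JUDUL_JUGA = ["NIK", "IK", "PROVINSI", "KABUPATEN", "RTRW", "RT/RW", "RTW", "RTIRW", "RT RW", "VIK", "A"]
--
-- def textract_lines_to_rekognition(lines: List[str]):
--     alll = []
--     segment = []
--     for word in lines:
--         if ismixed(word) or word in JUDUL_JUGA:
--             alll.append(" ".join(segment))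
--             segment = []
--         segment.append(word)
--     return alll
-- ===== SOURCE B (Python) =====
-- from typing import List
--
-- def ismixed(s):
--     return any(c.islower() for c in s) and any(c.isupper() for c in s)
--
-- JUDUL_JUGA = ["NIK", "IK", "PROVINSI", "KABUPATEN", "RTRW", "RT/RW", "RTW", "RTIRW", "RT RW", "VIK", "A"]
--
-- def textract_lines_to_rekognition(lines: List[str]):
--     bounds = [i for i, w in enumerate(lines) if ismixed(w) or w in JUDUL_JUGA]
--     return [" ".join(lines[p:c]) for p, c in zip([0] + bounds[:-1], bounds)]
-- ===== Notes on version B (the rewrite author's own statement) =====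
-- stated objective: alternative
-- what changed: B first computes the list of boundary indices (mixed-case words or JUDUL_JUGA headers) and then builds each output segment by joining a slice between consecutive boundaries, instead of A's single loop that mutates a running segment accumulator.
import Mathlib
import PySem

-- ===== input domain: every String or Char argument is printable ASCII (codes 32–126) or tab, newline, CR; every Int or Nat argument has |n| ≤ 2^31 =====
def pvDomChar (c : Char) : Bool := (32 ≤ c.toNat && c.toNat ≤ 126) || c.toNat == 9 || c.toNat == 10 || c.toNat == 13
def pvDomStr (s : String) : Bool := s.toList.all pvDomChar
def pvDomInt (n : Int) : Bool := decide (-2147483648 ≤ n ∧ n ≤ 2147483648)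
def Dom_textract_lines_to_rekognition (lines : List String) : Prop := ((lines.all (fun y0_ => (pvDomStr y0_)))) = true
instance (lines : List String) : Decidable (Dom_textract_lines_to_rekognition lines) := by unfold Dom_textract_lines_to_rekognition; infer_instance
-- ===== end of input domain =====

-- B computes boundary indices once and builds each segment by slicing between consecutive boundaries,
-- instead of A's running-accumulator loop; objective: alternative decomposition (same cost).

-- ===== PORT A =====
def JUDUL_JUGA : List String := ["NIK", "IK", "PROVINSI", "KABUPATEN", "RTRW", "RT/RW", "RTW", "RTIRW", "RT RW", "VIK", "A"]

def ismixed (s : String) : Bool :=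
  s.toList.any (fun c => PySem.Chars.islower c) && s.toList.any (fun c => PySem.Chars.isupper c)

-- the body of A's for-loop: one iteration over the state (alll, segment)
def pvStepA (st : List String × List String) (word : String) : List String × List String :=
  if ismixed word || JUDUL_JUGA.contains word then
    (st.1 ++ [PySem.Str.join " " st.2], [word])
  else
    (st.1, st.2 ++ [word])

def textract_lines_to_rekognition (lines : List String) : List String :=
  (lines.foldl pvStepA (([] : List String), ([] : List String))).1

-- ===== PORT B =====
-- bounds = [i for i, w in enumerate(lines) if ismixed(w) or w in JUDUL_JUGA]
def pvBounds (lines : List String) : List Int :=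
  (PySem.List.enumerate lines 0).filterMap
    (fun iw => if ismixed iw.2 || JUDUL_JUGA.contains iw.2 then some iw.1 else none)

def textract_lines_to_rekognition_alt (lines : List String) : List String :=
  let bounds := pvBounds lines
  ((0 :: bounds.dropLast).zip bounds).map
    (fun pc => PySem.Str.join " " (PySem.List.slice lines (some pc.1) (some pc.2)))

-- ===== PRECONDITION & SPEC =====
def Spec_textract_lines_to_rekognition (lines : List String) (out : List String) : Prop := out = textract_lines_to_rekognition_alt lines
instance (lines : List String) (out : List String) : Decidable (Spec_textract_lines_to_rekognition lines out) := by unfold Spec_textract_lines_to_rekognition; infer_instance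

-- ===== CLAIM (what is proved, stated in full; the proofs are below) =====
def Claim_equal_textract_lines_to_rekognition : Prop := ∀ (lines : List String), Dom_textract_lines_to_rekognition lines → Spec_textract_lines_to_rekognition lines (textract_lines_to_rekognition lines)

-- ===== LEMMAS AND PROOFS =====

lemma pvBounds_append (ws : List String) (w : String) :
    pvBounds (ws ++ [w]) =
      pvBounds ws ++ (if ismixed w || JUDUL_JUGA.contains w then [(ws.length : Int)] else []) := by
  simp [pvBounds, PySem.List.enumerate_append, PySem.List.enumerate_cons, PySem.List.enumerate_nil]
  split <;> simp_all

lemma pvBounds_mem (ws : List String) {b : Int} (hb : b ∈ pvBounds ws) :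
    ∃ k : Nat, b = (k : Int) ∧ k < ws.length := by
  simp only [pvBounds, List.mem_filterMap] at hb
  obtain ⟨iw, hmem, hif⟩ := hb
  rw [PySem.List.mem_enumerate_iff] at hmem
  obtain ⟨k, hk, hp⟩ := hmem
  refine ⟨k, ?_, hk⟩
  split at hif
  · cases hif; simp [hp]
  · cases hif

lemma pvLastD (ws : List String) :
    ∃ L : Nat, (pvBounds ws).getLastD 0 = (L : Int) ∧ L ≤ ws.length := by
  by_cases h : pvBounds ws = []
  · exact ⟨0, by simp [h], by simp⟩
  · have hmem : (pvBounds ws).getLastD 0 ∈ pvBounds ws := by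
      rw [List.getLastD_eq_getLast?, List.getLast?_eq_some_getLast h, Option.getD_some]
      exact List.getLast_mem h
    obtain ⟨k, hk, hlt⟩ := pvBounds_mem ws hmem
    exact ⟨k, hk, le_of_lt hlt⟩

lemma pvZipShift {a : Int} (bs : List Int) (n : Int) :
    (a :: bs).zip (bs ++ [n]) = ((a :: bs.dropLast).zip bs) ++ [(bs.getLastD a, n)] := by
  induction bs generalizing a with
  | nil => simp
  | cons b bs ih =>
    rcases bs with _ | ⟨c, cs⟩
    · simp
    · simp only [List.cons_append, List.zip_cons_cons] at *
      rw [ih, List.dropLast_cons₂, List.getLastD_cons, List.zip_cons_cons,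
          List.getLastD_cons, List.cons_append]
      rw [List.getLastD_cons]

lemma pvSliceStable (ws : List String) (w : String) :
    ∀ pr ∈ (0 :: (pvBounds ws).dropLast).zip (pvBounds ws),
      PySem.List.slice (ws ++ [w]) (some pr.1) (some pr.2) =
        PySem.List.slice ws (some pr.1) (some pr.2) := by
  rintro ⟨x, y⟩ hpr
  obtain ⟨hx, hy⟩ := List.of_mem_zip hpr
  obtain ⟨kb, rfl, hkb⟩ := pvBounds_mem ws hy
  have hxN : ∃ ka : Nat, x = (ka : Int) ∧ ka ≤ ws.length := by
    rcases List.mem_cons.mp hx with h0 | hdl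
    · exact ⟨0, by simp [h0], by simp⟩
    · obtain ⟨ka, rfl, hlt⟩ := pvBounds_mem ws (List.mem_of_mem_dropLast hdl)
      exact ⟨ka, rfl, le_of_lt hlt⟩
  obtain ⟨ka, rfl, hka⟩ := hxN
  simp only [PySem.List.slice_natCast, List.drop_append, Nat.sub_eq_zero_of_le hka,
    List.drop_zero]
  rw [List.take_append_of_le_length (by rw [List.length_drop]; omega)]

lemma pvLoop (ws : List String) :
    ws.foldl pvStepA (([] : List String), ([] : List String)) =
      (textract_lines_to_rekognition_alt ws, ws.drop ((pvBounds ws).getLastD 0).toNat) := by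
  induction ws using List.reverseRecOn with
  | nil => rfl
  | append_singleton ws w ih =>
    obtain ⟨L, hL, hLle⟩ := pvLastD ws
    rw [List.foldl_append, ih]
    simp only [List.foldl_cons, List.foldl_nil]
    unfold pvStepA
    have hmapeq :
        List.map (fun pc => PySem.Str.join " " (PySem.List.slice (ws ++ [w]) (some pc.1) (some pc.2)))
            ((0 :: (pvBounds ws).dropLast).zip (pvBounds ws)) =
          List.map (fun pc => PySem.Str.join " " (PySem.List.slice ws (some pc.1) (some pc.2)))
            ((0 :: (pvBounds ws).dropLast).zip (pvBounds ws)) :=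
      List.map_congr_left (fun pr h => by rw [pvSliceStable ws w pr h])
    by_cases hp : (ismixed w || JUDUL_JUGA.contains w) = true
    · rw [if_pos hp]
      have hbnd : pvBounds (ws ++ [w]) = pvBounds ws ++ [(ws.length : Int)] := by
        rw [pvBounds_append, if_pos hp]
      rw [Prod.ext_iff]; dsimp only; constructor
      · show textract_lines_to_rekognition_alt ws ++ _ = _
        simp only [textract_lines_to_rekognition_alt, hbnd, List.dropLast_concat]
        rw [pvZipShift, List.map_append, hmapeq]
        congr 1
        simp only [List.map_cons, List.map_nil, hL]
        congr 2
        rw [PySem.List.slice_natCast, List.drop_append,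
            List.take_append_of_le_length (by simp)]
        rw [List.take_of_length_le (by simp)]
        have : ws.drop L = ws.drop ((L : Int).toNat) := by simp
        rw [← this]
      · show _ = (ws ++ [w]).drop ((pvBounds (ws ++ [w])).getLastD 0).toNat
        rw [hbnd, List.getLastD_concat]
        simp
    · rw [if_neg hp]
      have hbnd : pvBounds (ws ++ [w]) = pvBounds ws := by
        rw [pvBounds_append, if_neg hp, List.append_nil]
      rw [Prod.ext_iff]; dsimp only; constructor
      · show textract_lines_to_rekognition_alt ws = _
        simp only [textract_lines_to_rekognition_alt, hbnd]
        exact hmapeq.symm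
      · show ws.drop ((pvBounds ws).getLastD 0).toNat ++ [w] = _
        rw [hbnd, hL]
        simp only [Int.toNat_natCast, List.drop_append]
        simp [Nat.sub_eq_zero_of_le hLle]

-- ===== VERDICT (by name: the statement is the Claim_ definition above) =====
theorem textract_lines_to_rekognition_spec : Claim_equal_textract_lines_to_rekognition := by
  intro lines _
  unfold Spec_textract_lines_to_rekognition textract_lines_to_rekognition
  rw [pvLoop]
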